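-- pv_equiv track=rewrite | github.com/tycyd/codeforces | math/1383B GameGame.py | gamegame
-- ===== SOURCE A (Python) =====
-- def gamegame(n, a):
--     bc = [[0]*30, [0]*30]
--
--     for v in a:
--         for i in range(30):
--             bc[(v >> i) & 1][i] += 1
--
--     for i in range(29, -1, -1):
--         if bc[1][i] % 2 == 1:
--             if bc[1][i] % 4 == 3 and bc[0][i] % 2 == 0:
--                 return "LOSE"
--             else:
--                 return "WIN"
--
--     return "DRAW"
-- ===== SOURCE B (Python) =====
-- def gamegame(n, a):
--     x = 0
--     for v in a:
--         x ^= v % (1 << 30)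
--     if x == 0:
--         return "DRAW"
--     i = x.bit_length() - 1
--     c1 = 0
--     for v in a:
--         if (v % (1 << 30)) >> i & 1:
--             c1 += 1
--     return "LOSE" if c1 % 4 == 3 and (len(a) - c1) % 2 == 0 else "WIN"
-- ===== Notes on version B (the rewrite author's own statement) =====
-- stated objective: faster
-- what changed: Replaces A's 2x30 per-bit count table (30 inner-loop increments per element) and 30-step top-down scan by a single running XOR of the 30-bit-masked values; the XOR's top bit is the deciding bit, and one targeted count of elements with that bit set feeds the same WIN/LOSE rule.
import Mathlib
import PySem

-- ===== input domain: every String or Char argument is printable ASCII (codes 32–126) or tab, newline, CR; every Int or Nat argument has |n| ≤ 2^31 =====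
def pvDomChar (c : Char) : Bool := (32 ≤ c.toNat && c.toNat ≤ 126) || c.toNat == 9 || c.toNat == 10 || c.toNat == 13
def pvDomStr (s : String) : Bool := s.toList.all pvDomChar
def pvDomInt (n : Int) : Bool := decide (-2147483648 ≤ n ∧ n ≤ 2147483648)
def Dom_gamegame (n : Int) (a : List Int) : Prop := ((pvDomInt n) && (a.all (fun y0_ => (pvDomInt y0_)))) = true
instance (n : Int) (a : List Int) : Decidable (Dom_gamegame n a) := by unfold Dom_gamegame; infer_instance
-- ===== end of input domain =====

-- B replaces A's 2x30 bit-count table and 30-step top-down scan by a single XOR of the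
-- 30-bit-masked values plus one targeted count at the XOR's top bit (objective: faster; constant-factor — the
-- 30-iteration inner loop per element disappears).

-- ===== PORT A =====
-- inner loop body: bc[(v >> i) & 1][i] += 1; bc = [[0]*30, [0]*30] is kept as the pair
-- (bc[0], bc[1]); Python's (v >> i) & 1 is v >>> i (core Int arithmetic shift,
-- Python-exact per PYSEM.md) and PySem.Int.band _ 1
def gamegameUpd (v : Int) (bc : List Int × List Int) (i : Nat) : List Int × List Int :=
  if PySem.Int.band (v >>> i) 1 == 1
  then (bc.1, bc.2.set i (bc.2.getD i 0 + 1))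
  else (bc.1.set i (bc.1.getD i 0 + 1), bc.2)

-- one iteration of 'for v in a': 'for i in range(30): bc[(v >> i) & 1][i] += 1'
def gamegameStep (bc : List Int × List Int) (v : Int) : List Int × List Int :=
  (List.range 30).foldl (gamegameUpd v) bc

-- final loop 'for i in range(29, -1, -1)' with early return; the indices bc[1][i]/bc[0][i]
-- are always in range (i in 0..29, lists of length 30), so getD is exact here
def gamegameScan (bc0 bc1 : List Int) : List Nat → String
  | [] => "DRAW"
  | i :: rest =>
    if PySem.Int.mod (bc1.getD i 0) 2 == 1 then
      if PySem.Int.mod (bc1.getD i 0) 4 == 3 && PySem.Int.mod (bc0.getD i 0) 2 == 0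
      then "LOSE" else "WIN"
    else gamegameScan bc0 bc1 rest

def gamegame (n : Int) (a : List Int) : String :=
  let bc : List Int × List Int :=
    a.foldl gamegameStep (List.replicate 30 0, List.replicate 30 0)
  gamegameScan bc.1 bc.2 (List.range 30).reverse

-- ===== PORT B =====
-- x and the masked values v % (1 << 30) are nonnegative, so the accumulator is kept as a
-- Nat (Nat ^^^ and >>>/&&& are Python-exact on nonnegatives); x.bit_length() is
-- PySem.Int.bitLength
def gamegame_alt (n : Int) (a : List Int) : String :=
  let x : Nat := a.foldl (fun x v => x ^^^ (PySem.Int.mod v (2 ^ 30)).toNat) 0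
  if x == 0 then "DRAW"
  else
    let i : Nat := PySem.Int.bitLength (x : Int) - 1
    let c1 : Int := a.foldl
      (fun c v => if ((PySem.Int.mod v (2 ^ 30)).toNat >>> i) &&& 1 == 1 then c + 1 else c) 0
    if PySem.Int.mod c1 4 == 3 && PySem.Int.mod ((a.length : Int) - c1) 2 == 0
    then "LOSE" else "WIN"

-- ===== PRECONDITION & SPEC =====
def Spec_gamegame (n : Int) (a : List Int) (out : String) : Prop := out = gamegame_alt n a
instance (n : Int) (a : List Int) (out : String) : Decidable (Spec_gamegame n a out) := by unfold Spec_gamegame; infer_instance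

-- ===== CLAIM (what is proved, stated in full; the proofs are below) =====
def Claim_equal_gamegame : Prop := ∀ (n : Int) (a : List Int), Dom_gamegame n a → Spec_gamegame n a (gamegame n a)

-- ===== LEMMAS AND PROOFS =====

-- the 30-bit mask and the per-bit count of the list
def pvMask (v : Int) : Nat := (PySem.Int.mod v (2 ^ 30)).toNat
def pvCnt (a : List Int) (i : Nat) : Nat := a.countP (fun v => (pvMask v).testBit i)
def pvM (g : Nat → Int) : List Int := (List.range 30).map g

theorem pvMask_emod (v : Int) : pvMask v = (v % (2 ^ 30 : Int)).toNat := by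
  rw [pvMask, PySem.Int.mod_eq_emod_of_pos (by norm_num)]

theorem pvMask_lt (v : Int) : pvMask v < 2 ^ 30 := by
  rw [pvMask_emod]
  have h1 : v % (2 ^ 30 : Int) < 2 ^ 30 := Int.emod_lt_of_pos v (by norm_num)
  have h0 : 0 ≤ v % (2 ^ 30 : Int) := Int.emod_nonneg v (by norm_num)
  omega

theorem pvKey (B c r : Int) (hB : 0 < B) : (r + 2 * c * B) / B % 2 = r / B % 2 := by
  rw [Int.add_mul_ediv_right _ _ (by omega : B ≠ 0)]
  have := Int.add_mul_emod_self_left (r / B) 2 c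
  omega

-- A's bit test is the i-th bit of the 30-bit-masked value (i < 30)
theorem pvBitA (v : Int) (i : Nat) (hi : i < 30) :
    (PySem.Int.band (v >>> i) 1 == 1) = (pvMask v).testBit i := by
  rw [pvMask_emod, PySem.Int.band_one, PySem.Int.mod_eq_emod_of_pos (by norm_num)]
  rw [Int.shiftRight_eq_div_pow]
  push_cast
  set r : Int := v % 2 ^ 30 with hr
  have hr0 : 0 ≤ r := Int.emod_nonneg v (by norm_num)
  have hv : v = r + 2 * ((2:Int) ^ (29 - i) * (v / 2 ^ 30)) * (2:Int) ^ i := by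
    have h1 := Int.mul_ediv_add_emod v (2 ^ 30)
    have hpow : 2 * ((2:Int) ^ (29 - i) * (v / 2 ^ 30)) * 2 ^ i = 2 ^ 30 * (v / 2 ^ 30) := by
      rw [show (2:Int) ^ 30 = 2 * ((2:Int) ^ (29 - i)) * 2 ^ i by
        rw [mul_assoc, ← pow_add, ← pow_succ']; congr 1; omega]
      ring
    omega
  rw [show v / (2:Int) ^ i % 2 = r / (2:Int) ^ i % 2 by
    conv_lhs => rw [hv]
    exact pvKey _ _ _ (by positivity)]
  rw [show r = ((r.toNat : Int)) from (Int.toNat_of_nonneg hr0).symm]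
  rw [show ((r.toNat : Int)) / (2:Int) ^ i % 2 = ((r.toNat / 2 ^ i % 2 : Nat) : Int) by
    push_cast [Int.natCast_div]; rfl]
  rw [Nat.testBit_eq_decide_div_mod_eq, show (1073741824:Int) = 2^30 by norm_num, ← hr]
  generalize r.toNat / 2 ^ i % 2 = k
  simp only [beq_eq_decide, decide_eq_decide]
  omega

-- B's bit test is testBit
theorem pvBitB (x i : Nat) : ((x >>> i) &&& 1 == 1) = x.testBit i := by
  simp [Nat.testBit_eq_decide_div_mod_eq, Nat.and_one_is_mod, Nat.shiftRight_eq_div_pow,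
    beq_eq_decide]

-- pvM bookkeeping
theorem pvM_getD (g : Nat → Int) (k : Nat) (hk : k < 30) : (pvM g).getD k 0 = g k := by
  rw [pvM, List.getD_eq_getElem?_getD]
  rw [List.getElem?_map]
  simp [hk]

theorem pvM_set (g : Nat → Int) (k : Nat) (x : Int) :
    (pvM g).set k x = pvM (fun j => if j = k then x else g j) := by
  apply List.ext_getElem
  · simp [pvM]
  · intro i h1 h2
    simp only [pvM, List.length_map, List.length_range] at h1 h2 ⊢
    rw [List.getElem_set]
    simp only [List.getElem_map, List.getElem_range]
    split_ifs <;> first | rfl | omega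

theorem pvM_congr {g g' : Nat → Int} (h : ∀ i, i < 30 → g i = g' i) : pvM g = pvM g' := by
  rw [pvM, pvM]
  apply List.map_congr_left
  intro i hi
  exact h i (List.mem_range.mp hi)

-- the inner 'for i in range(30)' loop, on count tables
theorem pvInner (v : Int) (g0 g1 : Nat → Int) : ∀ k, k ≤ 30 →
    (List.range k).foldl (gamegameUpd v) (pvM g0, pvM g1) =
      (pvM fun i => if i < k then g0 i + (if (pvMask v).testBit i then 0 else 1) else g0 i,
       pvM fun i => if i < k then g1 i + (if (pvMask v).testBit i then 1 else 0) else g1 i) := by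
  intro k
  induction k with
  | zero =>
    intro _
    simp only [List.range_zero, List.foldl_nil]
    congr 1
  | succ k ih =>
    intro hk
    rw [List.range_succ, List.foldl_append, ih (by omega), List.foldl_cons, List.foldl_nil]
    rw [gamegameUpd, pvBitA v k (by omega)]
    by_cases hb : (pvMask v).testBit k
    · rw [if_pos (by simpa using hb)]
      simp only
      rw [pvM_getD _ k (by omega), pvM_set]
      congr 1 <;> apply pvM_congr <;> intro i hi <;> by_cases h1 : i = k
      · subst h1; simp [hb]
      · split_ifs <;> first | rfl | omega
      · subst h1; simp [hb]
      · rw [if_neg h1]; split_ifs <;> first | rfl | omega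
    · rw [if_neg (by simpa using hb)]
      simp only
      rw [pvM_getD _ k (by omega), pvM_set]
      congr 1 <;> apply pvM_congr <;> intro i hi <;> by_cases h1 : i = k
      · subst h1; simp [hb]
      · rw [if_neg h1]; split_ifs <;> first | rfl | omega
      · subst h1; simp [hb]
      · split_ifs <;> first | rfl | omega

-- the outer 'for v in a' loop: the tables count bits
theorem pvOuter (a : List Int) : ∀ g0 g1 : Nat → Int,
    a.foldl gamegameStep (pvM g0, pvM g1) =
      (pvM fun i => g0 i + ((a.countP (fun v => !(pvMask v).testBit i) : Nat) : Int),
       pvM fun i => g1 i + (pvCnt a i : Nat)) := by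
  induction a with
  | nil =>
    intro g0 g1
    simp only [List.foldl_nil, pvCnt, List.countP_nil]
    congr 1 <;> apply pvM_congr <;> intro i _ <;> simp
  | cons v rest ih =>
    intro g0 g1
    rw [List.foldl_cons, gamegameStep, pvInner v g0 g1 30 (by omega)]
    rw [show (pvM fun i => if i < 30 then g0 i + (if (pvMask v).testBit i then 0 else 1) else g0 i)
        = pvM fun i => g0 i + (if (pvMask v).testBit i then 0 else 1) from
      pvM_congr fun i hi => by rw [if_pos hi]]
    rw [show (pvM fun i => if i < 30 then g1 i + (if (pvMask v).testBit i then 1 else 0) else g1 i)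
        = pvM fun i => g1 i + (if (pvMask v).testBit i then 1 else 0) from
      pvM_congr fun i hi => by rw [if_pos hi]]
    rw [ih]
    congr 1
    · apply pvM_congr; intro i _
      rw [List.countP_cons]
      by_cases hb : (pvMask v).testBit i <;> simp [hb]; try ring
    · apply pvM_congr; intro i _
      rw [pvCnt, pvCnt, List.countP_cons]
      by_cases hb : (pvMask v).testBit i <;> simp [hb]; try ring

-- B's XOR accumulator: its bits are the parities of the per-bit counts
theorem pvCnt_cons (v : Int) (rest : List Int) (i : Nat) :
    pvCnt (v :: rest) i = pvCnt rest i + (if (pvMask v).testBit i then 1 else 0) := by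
  rw [pvCnt, List.countP_cons, ← pvCnt]

theorem pvXorBits (a : List Int) : ∀ (x0 : Nat) (i : Nat),
    (a.foldl (fun x v => x ^^^ (PySem.Int.mod v (2 ^ 30)).toNat) x0).testBit i =
      ((x0.testBit i).xor (decide (pvCnt a i % 2 = 1))) := by
  induction a with
  | nil => intro x0 i; simp [pvCnt]
  | cons v rest ih =>
    intro x0 i
    rw [List.foldl_cons, ih, pvCnt_cons, Nat.testBit_xor, ← pvMask]
    generalize pvCnt rest i = c
    by_cases hb : (pvMask v).testBit i <;>
      cases hx : x0.testBit i <;>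
      rcases Nat.mod_two_eq_zero_or_one c with h | h <;>
      simp [hb, Nat.add_mod, h]

theorem pvXorLt (a : List Int) : ∀ x0 : Nat, x0 < 2 ^ 30 →
    (a.foldl (fun x v => x ^^^ (PySem.Int.mod v (2 ^ 30)).toNat) x0) < 2 ^ 30 := by
  induction a with
  | nil => intro x0 h; simpa using h
  | cons v rest ih =>
    intro x0 h
    rw [List.foldl_cons]
    exact ih _ (Nat.xor_lt_two_pow h (by rw [← pvMask]; exact pvMask_lt v))

-- B's counting loop
theorem pvC1 (a : List Int) (i : Nat) : ∀ c : Int,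
    a.foldl (fun c v => if ((PySem.Int.mod v (2 ^ 30)).toNat >>> i) &&& 1 == 1
      then c + 1 else c) c = c + (pvCnt a i : Nat) := by
  induction a with
  | nil => intro c; simp [pvCnt]
  | cons v rest ih =>
    intro c
    rw [List.foldl_cons, pvCnt_cons]
    by_cases hb : (pvMask v).testBit i
    · rw [if_pos (by rw [pvMask] at hb; rw [pvBitB]; exact hb), ih, if_pos hb]
      push_cast; ring
    · rw [if_neg (by rw [pvMask] at hb; rw [pvBitB]; exact hb), ih, if_neg hb]
      push_cast; ring

-- the scan returns DRAW when every listed bit has even count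
theorem pvScanDraw (bc0 : List Int) (f1 : Nat → Int) (l : List Nat)
    (h : ∀ i ∈ l, i < 30 ∧ ¬(PySem.Int.mod (f1 i) 2 == 1)) :
    gamegameScan bc0 (pvM f1) l = "DRAW" := by
  induction l with
  | nil => rfl
  | cons i rest ih =>
    obtain ⟨hi, hodd⟩ := h i (List.mem_cons_self)
    rw [gamegameScan, pvM_getD _ i hi, if_neg (by simpa using hodd)]
    exact ih (fun j hj => h j (List.mem_cons_of_mem _ hj))

-- the scan finds the highest odd bit t and decides there
theorem pvScanHit (f0 f1 : Nat → Int) (t : Nat) (ht : t < 30)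
    (hodd : PySem.Int.mod (f1 t) 2 == 1)
    (heven : ∀ j, t < j → j < 30 → ¬(PySem.Int.mod (f1 j) 2 == 1)) :
    ∀ m, t + m < 30 →
      gamegameScan (pvM f0) (pvM f1) ((List.range (t + m + 1)).reverse) =
        (if PySem.Int.mod (f1 t) 4 == 3 && PySem.Int.mod (f0 t) 2 == 0
         then "LOSE" else "WIN") := by
  intro m
  induction m with
  | zero =>
    intro _
    rw [List.range_succ, List.reverse_append, List.reverse_singleton]
    simp only [List.singleton_append]
    rw [gamegameScan, pvM_getD _ t ht, pvM_getD _ t ht, if_pos (by simpa using hodd)]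
  | succ m ih =>
    intro hm
    rw [show t + (m + 1) + 1 = (t + m + 1) + 1 by omega, List.range_succ,
      List.reverse_append, List.reverse_singleton, List.singleton_append]
    rw [gamegameScan, pvM_getD _ (t + m + 1) (by omega),
      if_neg (by simpa using heven (t + m + 1) (by omega) (by omega))]
    exact ih (by omega)

-- the initial tables are pvM of the zero function
theorem pvInit : (List.replicate 30 (0:Int), List.replicate 30 (0:Int)) =
    ((pvM fun _ => 0), (pvM fun _ => 0)) := by
  rw [pvM, List.map_const', List.length_range]

-- top-bit facts for a nonzero x < 2^30
theorem pvTop (x : Nat) (hx : x ≠ 0) (hlt : x < 2 ^ 30) :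
    (PySem.Int.bitLength (x : Int) - 1) < 30 ∧
    x.testBit (PySem.Int.bitLength (x : Int) - 1) = true ∧
    (∀ j, (PySem.Int.bitLength (x : Int) - 1) < j → x.testBit j = false) := by
  set L := PySem.Int.bitLength (x : Int) with hL
  have h1 : x < 2 ^ L := by
    have := PySem.Int.lt_two_pow_bitLength (x : Int)
    simpa using this
  have h2 : 2 ^ (L - 1) ≤ x := by
    have := PySem.Int.two_pow_bitLength_le (x : Int) (by exact_mod_cast hx)
    simpa using this
  have hL1 : 1 ≤ L := by
    by_contra h
    have : L = 0 := by omega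
    rw [this] at h1; simp at h1; omega
  have ht30 : L - 1 < 30 := by
    by_contra h
    have : 2 ^ 30 ≤ 2 ^ (L - 1) := Nat.pow_le_pow_right (by omega) (by omega)
    omega
  refine ⟨ht30, ?_, ?_⟩
  · rw [Nat.testBit_eq_decide_div_mod_eq]
    have hup : x < 2 ^ (L - 1) * 2 := by
      rw [← pow_succ]
      have : L - 1 + 1 = L := by omega
      rw [this]; exact h1
    have hd1 : 1 ≤ x / 2 ^ (L - 1) := (Nat.le_div_iff_mul_le (by positivity)).mpr (by omega)
    have hd2 : x / 2 ^ (L - 1) < 2 := (Nat.div_lt_iff_lt_mul (by positivity)).mpr (by omega)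
    simp only [decide_eq_true_eq]
    omega
  · intro j hj
    apply Nat.testBit_lt_two_pow
    calc x < 2 ^ L := h1
    _ ≤ 2 ^ j := Nat.pow_le_pow_right (by omega) (by omega)

-- ===== VERDICT (by name: the statement is the Claim_ definition above) =====
theorem gamegame_spec : Claim_equal_gamegame := by
  intro n a _
  unfold Spec_gamegame gamegame gamegame_alt
  rw [pvInit, pvOuter a (fun _ => 0) (fun _ => 0)]
  simp only [zero_add]
  set X := a.foldl (fun x v => x ^^^ (PySem.Int.mod v (2 ^ 30)).toNat) 0 with hX
  have hbits : ∀ i, X.testBit i = decide (pvCnt a i % 2 = 1) := by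
    intro i
    rw [hX, pvXorBits a 0 i]
    simp
  by_cases h0 : X = 0
  · rw [if_pos (by simpa using h0)]
    apply pvScanDraw
    intro i hi
    have hi30 : i < 30 := List.mem_range.mp (List.mem_reverse.mp hi)
    refine ⟨hi30, ?_⟩
    have h1 := hbits i
    rw [h0] at h1
    simp only [Nat.zero_testBit] at h1
    have h2 : ¬ (pvCnt a i % 2 = 1) := by simpa using h1.symm
    rw [PySem.Int.mod_eq_emod_of_pos (by norm_num)]
    simp only [beq_eq_decide, decide_eq_true_eq]
    omega
  · rw [if_neg (by simpa using h0)]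
    obtain ⟨ht30, htop, habove⟩ := pvTop X h0 (pvXorLt a 0 (by norm_num))
    set t := PySem.Int.bitLength (X : Int) - 1 with htdef
    have hoddt : pvCnt a t % 2 = 1 := by
      have := hbits t; rw [htop] at this; simpa using this.symm
    have hevenj : ∀ j, t < j → pvCnt a j % 2 = 0 := by
      intro j hj
      have h1 := hbits j; rw [habove j hj] at h1
      have h2 : ¬ (pvCnt a j % 2 = 1) := by simpa using h1.symm
      omega
    have hs := pvScanHit (fun i => ((a.countP (fun v => !(pvMask v).testBit i) : Nat) : Int))
      (fun i => ((pvCnt a i : Nat) : Int)) t ht30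
      (by rw [PySem.Int.mod_eq_emod_of_pos (by norm_num)]
          simp only [beq_eq_decide, decide_eq_true_eq]; omega)
      (by intro j hj _
          rw [PySem.Int.mod_eq_emod_of_pos (by norm_num)]
          simp only [beq_eq_decide, decide_eq_true_eq]
          have := hevenj j hj; omega)
      (29 - t) (by omega)
    rw [show t + (29 - t) + 1 = 30 by omega] at hs
    beta_reduce at hs
    rw [hs, pvC1 a t 0]
    simp only [zero_add]
    have hsplit : a.length = pvCnt a t + a.countP (fun v => !(pvMask v).testBit t) := by
      rw [pvCnt]
      simpa using List.length_eq_countP_add_countP (fun v => (pvMask v).testBit t) (l := a)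
    have hzc : ((a.countP (fun v => !(pvMask v).testBit t) : Nat) : Int) =
        ((a.length : Int) - (pvCnt a t : Nat)) := by
      omega
    simp only [hzc]
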